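-- pv_equiv track=rewrite | github.com/DevilCoders/Yandex | cloud/mdb/salt/salt/_states/mdb_postgresql.py | get_extensions_order_to_drop
-- ===== SOURCE A (Python) =====
-- def dfs(edges, used, current, result_order):
--     if current in used:
--         return
--     for dependent in edges.get(current, []):
--         dfs(edges, used, dependent, result_order)
--     result_order.append(current)
--     used.add(current)
--
-- def get_extensions_order_to_drop(deps, doomed_extensions):
--     reverse_deps = dict()
--     if deps:
--         for dependent_extension in deps:
--             for extension in deps[dependent_extension]:
--                 reverse_deps[extension] = reverse_deps.get(extension, [])
--                 reverse_deps[extension].append(dependent_extension)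
--     result_order = []
--     used = set()
--     for extension in doomed_extensions:
--         dfs(reverse_deps, used, extension, result_order)
--     return [e for e in result_order if e in doomed_extensions]
-- ===== SOURCE B (Python) =====
-- def get_extensions_order_to_drop(deps, doomed_extensions):
--     reverse_deps = {}
--     if deps:
--         for dependent_extension in deps:
--             for extension in deps[dependent_extension]:
--                 reverse_deps.setdefault(extension, []).append(dependent_extension)
--     result_order = []
--     used = set()
--     for start in doomed_extensions:
--         stack = [(start, False)]
--         while stack:
--             node, finished = stack.pop()
--             if finished:
--                 result_order.append(node)
--                 used.add(node)
--             elif node not in used: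
--                 stack.append((node, True))
--                 for dep in reversed(reverse_deps.get(node, [])):
--                     stack.append((dep, False))
--     return [e for e in result_order if e in doomed_extensions]
-- ===== Notes on version B (the rewrite author's own statement) =====
-- stated objective: alternative
-- what changed: The recursive dfs helper is replaced by an iterative explicit-stack depth-first search (frames (node, finished) with post-order emission), removing recursion entirely while keeping the reverse-dependency index and the final filter.
import Mathlib
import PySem

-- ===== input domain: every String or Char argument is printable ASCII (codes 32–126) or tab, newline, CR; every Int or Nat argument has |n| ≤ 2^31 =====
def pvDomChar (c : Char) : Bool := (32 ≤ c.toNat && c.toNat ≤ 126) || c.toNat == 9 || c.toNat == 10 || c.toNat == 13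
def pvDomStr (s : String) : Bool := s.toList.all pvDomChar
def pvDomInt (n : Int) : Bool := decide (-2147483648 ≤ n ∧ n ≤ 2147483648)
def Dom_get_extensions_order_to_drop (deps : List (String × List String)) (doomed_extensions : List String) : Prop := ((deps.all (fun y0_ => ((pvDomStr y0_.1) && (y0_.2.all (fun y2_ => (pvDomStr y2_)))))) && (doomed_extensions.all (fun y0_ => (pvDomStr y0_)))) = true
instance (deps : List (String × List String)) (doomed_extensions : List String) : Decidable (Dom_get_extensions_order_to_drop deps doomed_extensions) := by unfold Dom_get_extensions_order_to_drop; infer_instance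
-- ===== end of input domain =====

-- B replaces A's recursive depth-first search by an explicit-stack iterative DFS
-- (same reverse-dependency index, same post-order output); equivalence is proved
-- on inputs whose reverse-dependency graph has no cycle reachable from
-- doomed_extensions — exactly the inputs where A's recursion returns at all.

-- ===== PORT A =====
-- the recursion of Python's `dfs` is not structurally terminating (A recurses
-- forever / raises RecursionError on reachable cycles), so the port carries a
-- fuel counter that decreases once per recursion level; `dfsFuelA` (number of
-- distinct node names + 1) bounds the recursion depth on every input Pre_ admits,
-- so inside Pre_ the fuel never runs out (proved below) and the port is exact.
def dfsA (edges : PySem.Dict String (List String)) :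
    Nat → PySem.Set String → String → List String → Option (List String × PySem.Set String)
  | 0, _, _, _ => none
  | f + 1, used, current, result_order =>
    if PySem.Set.contains used current then some (result_order, used)
    else
      match ((PySem.Dict.get? edges current).getD []).foldl
          (fun acc dependent => acc.bind (fun p => dfsA edges f p.2 dependent p.1))
          (some (result_order, used)) with
      | none => none
      | some (o, u) => some (o ++ [current], PySem.Set.add u current)

def revDepsA (deps : List (String × List String)) : PySem.Dict String (List String) :=
  if deps.isEmpty then PySem.Dict.empty
  else
    deps.foldl
      (fun rd kv =>
        kv.2.foldl
          (fun rd2 extension =>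
            PySem.Dict.insert rd2 extension
              (((PySem.Dict.get? rd2 extension).getD []) ++ [kv.1]))
          rd)
      PySem.Dict.empty

def dfsFuelA (deps : List (String × List String)) (doomed : List String) : Nat :=
  (PySem.Set.ofList (doomed ++ deps.map (·.1) ++ (deps.map (·.2)).flatten)).length + 1

def get_extensions_order_to_drop (deps : List (String × List String)) (doomed_extensions : List String) : List String :=
  match doomed_extensions.foldl
      (fun acc extension => acc.bind (fun p => dfsA (revDepsA deps) (dfsFuelA deps doomed_extensions) p.2 extension p.1))
      (some ([], PySem.Set.empty)) with
  | none => []  -- fuel exhausted: only on inputs outside Pre_ (where Python A raises)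
  | some (result_order, _) => result_order.filter (fun e => doomed_extensions.contains e)

-- ===== PORT B =====
-- Source B's while-loop over an explicit stack; fuel bounds the number of loop
-- iterations (the loop, like A, does not terminate on reachable cycles).
def runB (edges : PySem.Dict String (List String)) :
    Nat → List (String × Bool) → List String → PySem.Set String → Option (List String × PySem.Set String)
  | 0, _, _, _ => none
  | _ + 1, [], result_order, used => some (result_order, used)
  | f + 1, (node, finished) :: stack, result_order, used =>
    if finished then runB edges f stack (result_order ++ [node]) (PySem.Set.add used node)
    else if PySem.Set.contains used node then runB edges f stack result_order used
    else
      runB edges f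
        (((PySem.Dict.get? edges node).getD []).map (fun dep => (dep, false)) ++ (node, true) :: stack)
        result_order used

def revDepsB (deps : List (String × List String)) : PySem.Dict String (List String) :=
  if deps.isEmpty then PySem.Dict.empty
  else
    deps.foldl
      (fun rd kv =>
        kv.2.foldl
          (fun rd2 extension => PySem.Dict.modify rd2 extension [] (fun l => l ++ [kv.1]))
          rd)
      PySem.Dict.empty

def nodesB (deps : List (String × List String)) (doomed : List String) : List String :=
  PySem.Set.ofList (doomed ++ deps.map (·.1) ++ (deps.map (·.2)).flatten)

def fuelB (edges : PySem.Dict String (List String)) (nodes : List String) : Nat :=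
  nodes.foldl (fun a n => a + (2 + ((PySem.Dict.get? edges n).getD []).length)) 2

def get_extensions_order_to_drop_alt (deps : List (String × List String)) (doomed_extensions : List String) : List String :=
  match doomed_extensions.foldl
      (fun acc start => acc.bind (fun p =>
        runB (revDepsB deps) (fuelB (revDepsB deps) (nodesB deps doomed_extensions)) [(start, false)] p.1 p.2))
      (some ([], PySem.Set.empty)) with
  | none => []  -- fuel exhausted: only outside Pre_ (there Source B's loop does not terminate)
  | some (result_order, _) => result_order.filter (fun e => doomed_extensions.contains e)

-- ===== PRECONDITION & SPEC =====
-- Pre_ helpers: reachability in the reverse-dependency graph read off `deps`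
-- directly (edge a → b when a ∈ deps[b]); closureR iterates one-step expansion
-- enough times to saturate (every reachable node is in S ∪ keys of deps).
def succsOf (deps : List (String × List String)) (n : String) : List String :=
  (deps.filter (fun p => p.2.contains n)).map (·.1)

def expandR (deps : List (String × List String)) (S : List String) : List String :=
  PySem.Set.ofList (S ++ S.flatMap (succsOf deps))

def closureR (deps : List (String × List String)) (S : List String) : List String :=
  (expandR deps)^[S.length + deps.length + 3] S

-- Pre_ holds exactly when no node reachable from doomed_extensions lies on a
-- cycle of the reverse-dependency graph: exactly the inputs where Python A's
-- recursion returns instead of raising RecursionError (B's loop diverges there too).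
def Pre_get_extensions_order_to_drop (deps : List (String × List String)) (doomed_extensions : List String) : Prop :=
  ∀ n ∈ closureR deps doomed_extensions, n ∉ closureR deps (succsOf deps n)

instance (deps : List (String × List String)) (doomed_extensions : List String) : Decidable (Pre_get_extensions_order_to_drop deps doomed_extensions) := by
  unfold Pre_get_extensions_order_to_drop; infer_instance

def pvWitness_get_extensions_order_to_drop : (List (String × List String)) × List String :=
  ([("pg_stat", ["pg_trgm"]), ("postgis", ["pg_trgm"])], ["pg_trgm", "postgis"])

def Spec_get_extensions_order_to_drop (deps : List (String × List String)) (doomed_extensions : List String) (out : List String) : Prop := out = get_extensions_order_to_drop_alt deps doomed_extensions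
instance (deps : List (String × List String)) (doomed_extensions : List String) (out : List String) : Decidable (Spec_get_extensions_order_to_drop deps doomed_extensions out) := by unfold Spec_get_extensions_order_to_drop; infer_instance

-- ===== CLAIM (what is proved, stated in full; the proofs are below) =====
def Claim_equal_get_extensions_order_to_drop : Prop := ∀ (deps : List (String × List String)) (doomed_extensions : List String), Dom_get_extensions_order_to_drop deps doomed_extensions → Pre_get_extensions_order_to_drop deps doomed_extensions → Spec_get_extensions_order_to_drop deps doomed_extensions (get_extensions_order_to_drop deps doomed_extensions)

-- ===== LEMMAS AND PROOFS =====

def chl (ed : PySem.Dict String (List String)) (n : String) : List String :=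
  (PySem.Dict.get? ed n).getD []
def W (ed : PySem.Dict String (List String)) (allN : List String) (u : PySem.Set String) : Nat :=
  ((allN.filter (fun n => !PySem.Set.contains u n)).map (fun n => 2 + (chl ed n).length)).sum
def EdgD (ed : PySem.Dict String (List String)) (a b : String) : Prop := b ∈ chl ed a

def EdgS (deps : List (String × List String)) (a b : String) : Prop := b ∈ succsOf deps a

theorem foldl_bind_none {α σ : Type} (g : α → σ → Option σ) (l : List α) :
    l.foldl (fun acc d => acc.bind (g d)) none = none := by
  induction l with
  | nil => rfl
  | cons x xs ih => simpa using ih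

theorem foldl_bind_cons {α σ : Type} (g : α → σ → Option σ) (x : α) (xs : List α) (s : σ) :
    (x :: xs).foldl (fun acc d => acc.bind (g d)) (some s)
      = xs.foldl (fun acc d => acc.bind (g d)) (g x s) := by
  simp [List.foldl]

theorem runB_mono (ed : PySem.Dict String (List String)) :
    ∀ f st o u r, runB ed f st o u = some r → runB ed (f + 1) st o u = some r := by
  intro f
  induction f with
  | zero => intro st o u r h; simp [runB] at h
  | succ f ih =>
    intro st o u r h
    match st with
    | [] => simpa [runB] using h
    | (n, fin) :: st =>
      simp only [runB] at h ⊢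
      split_ifs at h ⊢ with h1 h2
      · exact ih _ _ _ _ h
      · exact ih _ _ _ _ h
      · exact ih _ _ _ _ h

theorem runB_le (ed : PySem.Dict String (List String)) (f g : Nat) (h : f ≤ g) :
    ∀ st o u r, runB ed f st o u = some r → runB ed g st o u = some r := by
  induction g with
  | zero => intro st o u r hr; have : f = 0 := Nat.le_zero.mp h; subst this; exact hr
  | succ g ih =>
    intro st o u r hr
    rcases Nat.lt_or_ge f (g+1) with hlt | hge
    · exact runB_mono ed g st o u r (ih (Nat.lt_succ_iff.mp hlt) st o u r hr)
    · have : f = g + 1 := Nat.le_antisymm h hge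
      subst this; exact hr

theorem dfsA_used_mono (ed : PySem.Dict String (List String)) :
    ∀ f u c o o' u', dfsA ed f u c o = some (o', u') → ∀ x, x ∈ u → x ∈ u' := by
  intro f
  induction f with
  | zero => intro u c o o' u' h; simp [dfsA] at h
  | succ f ih =>
    have aux : ∀ (l : List String) o0 u0 ok uk,
        l.foldl (fun acc d => acc.bind (fun p => dfsA ed f p.2 d p.1)) (some (o0, u0)) = some (ok, uk) →
        ∀ x, x ∈ u0 → x ∈ uk := by
      intro l
      induction l with
      | nil => intro o0 u0 ok uk h x hx; simp at h; rw [← h.2]; exact hx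
      | cons d l ihl =>
        intro o0 u0 ok uk h x hx
        rw [foldl_bind_cons] at h
        cases h1 : dfsA ed f u0 d o0 with
        | none => rw [h1, foldl_bind_none] at h; exact absurd h (by simp)
        | some p =>
          rw [h1] at h
          exact ihl p.1 p.2 ok uk (by cases p; exact h) x (ih _ _ _ _ _ h1 x hx)
    intro u c o o' u' h x hx
    simp only [dfsA] at h
    split_ifs at h with h1
    · cases h; exact hx
    · cases hfold : ((PySem.Dict.get? ed c).getD []).foldl
          (fun acc d => acc.bind (fun p => dfsA ed f p.2 d p.1)) (some (o, u)) with
      | none => rw [hfold] at h; simp at h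
      | some p =>
        rw [hfold] at h
        cases p with
        | mk ok uk =>
          simp at h
          rw [← h.2, PySem.Set.mem_add]
          exact Or.inl (aux _ _ _ _ _ hfold x hx)

theorem dfsA_reach (ed : PySem.Dict String (List String)) :
    ∀ f u c o o' u', dfsA ed f u c o = some (o', u') →
      ∀ x, x ∈ u' → x ∈ u ∨ Relation.ReflTransGen (EdgD ed) c x := by
  intro f
  induction f with
  | zero => intro u c o o' u' h; simp [dfsA] at h
  | succ f ih =>
    intro u c o o' u' h x hx
    simp only [dfsA] at h
    split_ifs at h with h1
    · cases h; exact Or.inl hx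
    · have aux : ∀ (l : List String), (∀ d ∈ l, d ∈ chl ed c) → ∀ o0 u0 ok uk,
          l.foldl (fun acc d => acc.bind (fun p => dfsA ed f p.2 d p.1)) (some (o0, u0)) = some (ok, uk) →
          ∀ y, y ∈ uk → y ∈ u0 ∨ Relation.ReflTransGen (EdgD ed) c y := by
        intro l
        induction l with
        | nil => intro _ o0 u0 ok uk h y hy; simp at h; rw [← h.2] at hy; exact Or.inl hy
        | cons d l ihl =>
          intro hdl o0 u0 ok uk h y hy
          rw [foldl_bind_cons] at h
          cases h1 : dfsA ed f u0 d o0 with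
          | none => rw [h1, foldl_bind_none] at h; exact absurd h (by simp)
          | some p =>
            rw [h1] at h
            rcases ihl (fun z hz => hdl z (List.mem_cons_of_mem d hz)) p.1 p.2 ok uk
                (by cases p; exact h) y hy with hin | hr
            · rcases ih _ _ _ _ _ h1 y hin with hin2 | hr2
              · exact Or.inl hin2
              · exact Or.inr (Relation.ReflTransGen.head (hdl d (List.mem_cons_self ..)) hr2)
            · exact Or.inr hr
      cases hfold : ((PySem.Dict.get? ed c).getD []).foldl
          (fun acc d => acc.bind (fun p => dfsA ed f p.2 d p.1)) (some (o, u)) with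
      | none => rw [hfold] at h; simp at h
      | some p =>
        rw [hfold] at h
        cases p with
        | mk ok uk =>
          simp at h
          rw [← h.2, PySem.Set.mem_add] at hx
          rcases hx with hx | rfl
          · exact aux _ (fun d hd => hd) _ _ _ _ hfold x hx
          · exact Or.inr Relation.ReflTransGen.refl
-- exported foldl variants
theorem foldl_dfsA_used_mono (ed : PySem.Dict String (List String)) (f : Nat) :
    ∀ (l : List String) o0 u0 ok uk,
      l.foldl (fun acc d => acc.bind (fun p => dfsA ed f p.2 d p.1)) (some (o0, u0)) = some (ok, uk) →
      ∀ x, x ∈ u0 → x ∈ uk := by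
  intro l
  induction l with
  | nil => intro o0 u0 ok uk h x hx; simp at h; rw [← h.2]; exact hx
  | cons d l ihl =>
    intro o0 u0 ok uk h x hx
    rw [foldl_bind_cons] at h
    cases h1 : dfsA ed f u0 d o0 with
    | none => rw [h1, foldl_bind_none] at h; exact absurd h (by simp)
    | some p =>
      rw [h1] at h
      exact ihl p.1 p.2 ok uk (by cases p; exact h) x (dfsA_used_mono ed f _ _ _ _ _ h1 x hx)

theorem foldl_dfsA_reach (ed : PySem.Dict String (List String)) (f : Nat) :
    ∀ (l : List String) o0 u0 ok uk,
      l.foldl (fun acc d => acc.bind (fun p => dfsA ed f p.2 d p.1)) (some (o0, u0)) = some (ok, uk) →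
      ∀ y, y ∈ uk → y ∈ u0 ∨ ∃ d ∈ l, Relation.ReflTransGen (EdgD ed) d y := by
  intro l
  induction l with
  | nil => intro o0 u0 ok uk h y hy; simp at h; rw [← h.2] at hy; exact Or.inl hy
  | cons d l ihl =>
    intro o0 u0 ok uk h y hy
    rw [foldl_bind_cons] at h
    cases h1 : dfsA ed f u0 d o0 with
    | none => rw [h1, foldl_bind_none] at h; exact absurd h (by simp)
    | some p =>
      rw [h1] at h
      rcases ihl p.1 p.2 ok uk (by cases p; exact h) y hy with hin | ⟨d2, hd2, hr⟩
      · rcases dfsA_reach ed f _ _ _ _ _ h1 y hin with hin2 | hr2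
        · exact Or.inl hin2
        · exact Or.inr ⟨d, List.mem_cons_self .., hr2⟩
      · exact Or.inr ⟨d2, List.mem_cons_of_mem d hd2, hr⟩

theorem W_congr (ed : PySem.Dict String (List String)) (allN : List String)
    (u v : PySem.Set String) (h : ∀ x ∈ allN, x ∈ u ↔ x ∈ v) : W ed allN u = W ed allN v := by
  unfold W
  rw [List.filter_congr]
  intro x hx
  have hxy := h x hx
  simp only [PySem.Set.contains_eq_listContains, List.contains_eq_mem]
  by_cases hm : x ∈ u
  · simp [hm, hxy.mp hm]
  · have h2 : x ∉ v := fun hv => hm (hxy.mpr hv)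
    simp [hm, h2]

theorem W_antitone (ed : PySem.Dict String (List String)) (allN : List String)
    (u v : PySem.Set String) (h : ∀ x, x ∈ u → x ∈ v) : W ed allN v ≤ W ed allN u := by
  unfold W
  apply List.Sublist.sum_le_sum
  · apply List.Sublist.map
    apply List.monotone_filter_right
    intro x hx
    simp only [PySem.Set.contains_eq_listContains, List.contains_eq_mem, Bool.not_eq_true',
      decide_eq_false_iff_not] at hx ⊢
    exact fun hu => hx (h x hu)
  · intro b _; exact Nat.zero_le b

theorem W_cons (ed : PySem.Dict String (List String)) (n : String) (rest : List String)
    (u : PySem.Set String) :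
    W ed (n :: rest) u = (if n ∈ u then 0 else 2 + (chl ed n).length) + W ed rest u := by
  unfold W
  simp only [List.filter_cons, PySem.Set.contains_eq_listContains, List.contains_eq_mem]
  by_cases hm : n ∈ u
  · simp [hm]
  · simp [hm]

theorem W_add (ed : PySem.Dict String (List String)) (allN : List String)
    (hnd : allN.Nodup) (u : PySem.Set String) (c : String)
    (hc : c ∈ allN) (hcu : c ∉ u) :
    W ed allN (PySem.Set.add u c) + (2 + (chl ed c).length) = W ed allN u := by
  induction allN with
  | nil => simp at hc
  | cons n rest ih =>
    have hnd' := (List.nodup_cons.mp hnd).2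
    have hn := (List.nodup_cons.mp hnd).1
    rw [W_cons, W_cons]
    rcases List.mem_cons.mp hc with h | h
    · subst h
      have hcr : c ∉ rest := hn
      have hmc : c ∈ PySem.Set.add u c := by rw [PySem.Set.mem_add]; right; rfl
      rw [if_pos hmc, if_neg hcu]
      have hW : W ed rest (PySem.Set.add u c) = W ed rest u := by
        apply W_congr
        intro x hx
        rw [PySem.Set.mem_add]
        constructor
        · rintro (hh | rfl)
          · exact hh
          · exact absurd hx hcr
        · exact fun hh => Or.inl hh
      omega
    · have hup : ∀ z, z ∈ PySem.Set.add u c ↔ z ∈ u ∨ z = c := fun z => PySem.Set.mem_add u c z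
      have hih := ih hnd' h
      by_cases hnu : n ∈ u
      · rw [if_pos ((hup n).mpr (Or.inl hnu)), if_pos hnu]
        omega
      · have hnc2 : n ≠ c := fun e => hn (e ▸ h)
        have : n ∉ PySem.Set.add u c := by
          rw [hup]; rintro (hh | hh)
          · exact hnu hh
          · exact hnc2 hh
        rw [if_neg this, if_neg hnu]
        omega

theorem W_le_empty (ed : PySem.Dict String (List String)) (allN : List String)
    (u : PySem.Set String) : W ed allN u ≤ W ed allN PySem.Set.empty := by
  apply W_antitone
  intro x hx
  simp [PySem.Set.empty] at hx

theorem fuelB_eq (ed : PySem.Dict String (List String)) (nodes : List String) :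
    fuelB ed nodes = 2 + W ed nodes PySem.Set.empty := by
  unfold fuelB W
  have hemp : ∀ n : String, (!PySem.Set.contains (PySem.Set.empty (α := String)) n) = true := by
    intro n; simp [PySem.Set.empty, PySem.Set.contains_eq_listContains]
  rw [List.filter_congr (fun x _ => hemp x)]
  simp only [List.filter_true]
  have aux : ∀ (l : List String) (init : Nat),
      l.foldl (fun a n => a + (2 + ((PySem.Dict.get? ed n).getD []).length)) init
        = init + (l.map (fun n => 2 + (chl ed n).length)).sum := by
    intro l
    induction l with
    | nil => intro init; simp
    | cons x xs ih => intro init; simp [List.foldl, ih, chl]; omega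
  rw [aux]

theorem bridge (ed : PySem.Dict String (List String)) (allN : List String)
    (hnd : allN.Nodup)
    (Rooted : String → Prop)
    (hclosed : ∀ a b, Rooted a → b ∈ chl ed a → Rooted b)
    (hroot : ∀ x, Rooted x → x ∈ allN)
    (hnc : ∀ x, Rooted x → ¬ Relation.TransGen (EdgD ed) x x) :
    ∀ f u c o o' u', dfsA ed f u c o = some (o', u') → Rooted c →
      ∀ st g r, runB ed g st o' u' = some r →
        runB ed (g + 1 + (W ed allN u - W ed allN u')) ((c, false) :: st) o u = some r := by
  intro f
  induction f with
  | zero => intro u c o o' u' h; simp [dfsA] at h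
  | succ f ih =>
    intro u c o o' u' h hc st g r hB
    simp only [dfsA] at h
    split_ifs at h with h1
    · -- node already used: A skips; B pops and skips
      cases h
      rw [Nat.sub_self]
      show runB ed (g + 1) ((c, false) :: st) o u = some r
      have hm : c ∈ u := by rw [← PySem.Set.contains_iff]; exact h1
      simpa [runB, hm] using hB
    · -- enter: children first, then the (c, true) frame
      have aux : ∀ (l : List String), (∀ d ∈ l, d ∈ chl ed c) → ∀ o0 u0 ok uk,
          l.foldl (fun acc d => acc.bind (fun p => dfsA ed f p.2 d p.1)) (some (o0, u0)) = some (ok, uk) →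
          ∀ st g r, runB ed g st ok uk = some r →
            runB ed (g + l.length + (W ed allN u0 - W ed allN uk))
              (l.map (fun d => (d, false)) ++ st) o0 u0 = some r := by
        intro l
        induction l with
        | nil =>
          intro _ o0 u0 ok uk h st g r hB
          simp at h
          obtain ⟨rfl, rfl⟩ := h
          simpa using hB
        | cons d l ihl =>
          intro hdl o0 u0 ok uk h st g r hB
          rw [foldl_bind_cons] at h
          cases h1 : dfsA ed f u0 d o0 with
          | none => rw [h1, foldl_bind_none] at h; exact absurd h (by simp)
          | some p =>
            rw [h1] at h
            obtain ⟨o1, u1⟩ := p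
            have hstep := ihl (fun z hz => hdl z (List.mem_cons_of_mem d hz)) o1 u1 ok uk h st g r hB
            have hrd : Rooted d := hclosed c d hc (hdl d (List.mem_cons_self ..))
            have hfirst := ih u0 d o0 o1 u1 h1 hrd _ _ _ hstep
            have m1 : ∀ x, x ∈ u0 → x ∈ u1 := dfsA_used_mono ed f _ _ _ _ _ h1
            have m2 : ∀ x, x ∈ u1 → x ∈ uk := foldl_dfsA_used_mono ed f l _ _ _ _ h
            have w1 : W ed allN u1 ≤ W ed allN u0 := W_antitone ed allN _ _ m1
            have w2 : W ed allN uk ≤ W ed allN u1 := W_antitone ed allN _ _ m2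
            have : g + l.length + (W ed allN u1 - W ed allN uk) + 1 + (W ed allN u0 - W ed allN u1)
                = g + (d :: l).length + (W ed allN u0 - W ed allN uk) := by
              simp only [List.length_cons]; omega
            rw [this] at hfirst
            simpa using hfirst
      cases hfold : ((PySem.Dict.get? ed c).getD []).foldl
          (fun acc d => acc.bind (fun p => dfsA ed f p.2 d p.1)) (some (o, u)) with
      | none => rw [hfold] at h; simp at h
      | some p =>
        rw [hfold] at h
        obtain ⟨ok, uk⟩ := p
        simp at h
        obtain ⟨ho, hu⟩ := h
        subst ho
        subst hu
        -- the (c, true) frame step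
        have htrue : runB ed (g + 1) ((c, true) :: st) ok uk = some r := by
          simpa [runB] using hB
        have hch := aux (chl ed c) (fun d hd => hd) o u ok uk (by simpa [chl] using hfold) _ _ _ htrue
        -- c was not completed by its own children (no reachable cycle)
        have hcu : c ∉ u := by
          intro hcu
          exact h1 (by rw [PySem.Set.contains_iff]; exact hcu)
        have hcuk : c ∉ uk := by
          intro hcuk
          rcases foldl_dfsA_reach ed f _ _ _ _ _ (by simpa [chl] using hfold) c hcuk with hin | ⟨d, hd, hr⟩
          · exact hcu hin
          · exact hnc c hc (Relation.TransGen.head' hd hr)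
        have hW : W ed allN (PySem.Set.add uk c) + (2 + (chl ed c).length) = W ed allN uk :=
          W_add ed allN hnd uk c (hroot c hc) hcuk
        have m0 : ∀ x, x ∈ u → x ∈ uk := foldl_dfsA_used_mono ed f _ _ _ _ _ (by simpa [chl] using hfold)
        have w0 : W ed allN uk ≤ W ed allN u := W_antitone ed allN _ _ m0
        -- final: take the (c, false) step, then lift fuel
        obtain ⟨G, hG⟩ : ∃ G, g + 1 + (W ed allN u - W ed allN (PySem.Set.add uk c)) = G + 1 :=
          ⟨g + (W ed allN u - W ed allN (PySem.Set.add uk c)), by omega⟩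
        rw [hG]
        simp only [runB, if_neg h1]
        simp only [Bool.false_eq_true, if_false]
        apply runB_le ed (g + 1 + (chl ed c).length + (W ed allN u - W ed allN uk)) G
        · omega
        · simpa [List.length_map] using hch

def AncChain (ed : PySem.Dict String (List String)) : List String → String → Prop
  | [], _ => True
  | p :: ps, c => c ∈ chl ed p ∧ AncChain ed ps p

theorem ancRTG (ed : PySem.Dict String (List String)) :
    ∀ P c d, AncChain ed P c → d ∈ c :: P → Relation.ReflTransGen (EdgD ed) d c := by
  intro P
  induction P with
  | nil =>
    intro c d _ hd
    simp at hd
    subst hd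
    exact Relation.ReflTransGen.refl
  | cons p ps ih =>
    intro c d hch hd
    rcases List.mem_cons.mp hd with rfl | hd2
    · exact Relation.ReflTransGen.refl
    · exact Relation.ReflTransGen.tail (ih p d hch.2 hd2) hch.1

theorem filter_len_drop (allN : List String) (hnd : allN.Nodup) (c : String)
    (hc : c ∈ allN) (P : List String) (hcP : c ∉ P) :
    (allN.filter (fun n => !decide (n ∈ c :: P))).length + 1
      = (allN.filter (fun n => !decide (n ∈ P))).length := by
  induction allN with
  | nil => simp at hc
  | cons n rest ih =>
    have hnd' := (List.nodup_cons.mp hnd).2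
    have hn := (List.nodup_cons.mp hnd).1
    simp only [List.filter_cons]
    rcases List.mem_cons.mp hc with rfl | h
    · have h1 : (c ∈ c :: P) := List.mem_cons_self ..
      simp only [h1, hcP, decide_true, decide_false, Bool.not_true, Bool.not_false]
      simp only [Bool.false_eq_true, if_false, if_true]
      have heq : rest.filter (fun x => !decide (x ∈ c :: P)) = rest.filter (fun x => !decide (x ∈ P)) := by
        apply List.filter_congr
        intro x hx
        have hxn : x ≠ c := fun e => hn (e ▸ hx)
        simp [List.mem_cons, hxn]
      rw [heq]
      simp
    · have hnc2 : n ≠ c := fun e => hn (e ▸ h)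
      have heq : (n ∈ c :: P) ↔ (n ∈ P) := by
        simp [List.mem_cons, hnc2]
      by_cases hP : n ∈ P
      · simp only [heq.mpr hP, hP, decide_true, Bool.not_true]
        simp only [Bool.false_eq_true, if_false]
        exact ih hnd' h
      · simp only [hP, decide_false, Bool.not_false, if_true]
        have := ih hnd' h
        simp only [List.length_cons]
        have hx : ¬ (n ∈ c :: P) := fun h2 => hP (heq.mp h2)
        simp only [hx, decide_false, Bool.not_false, if_true]
        simp only [List.length_cons]
        omega

theorem dfsA_suff (ed : PySem.Dict String (List String)) (allN : List String)
    (hnd : allN.Nodup)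
    (Rooted : String → Prop)
    (hclosed : ∀ a b, Rooted a → b ∈ chl ed a → Rooted b)
    (hroot : ∀ x, Rooted x → x ∈ allN)
    (hnc : ∀ x, Rooted x → ¬ Relation.TransGen (EdgD ed) x x) :
    ∀ f P c u o, Rooted c → AncChain ed P c → (c :: P).Nodup →
      (allN.filter (fun n => !decide (n ∈ P))).length ≤ f →
      ∃ o' u', dfsA ed f u c o = some (o', u') := by
  intro f
  induction f with
  | zero =>
    intro P c u o hc hch hndc hf
    exfalso
    have hcN : c ∈ allN := hroot c hc
    have hcP : c ∉ P := (List.nodup_cons.mp hndc).1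
    have : c ∈ allN.filter (fun n => !decide (n ∈ P)) :=
      List.mem_filter.mpr ⟨hcN, by simp [hcP]⟩
    have := List.length_pos_of_mem this
    omega
  | succ f ih =>
    intro P c u o hc hch hndc hf
    by_cases h1 : PySem.Set.contains u c
    · have hm : c ∈ u := by rw [← PySem.Set.contains_iff]; exact h1
      exact ⟨o, u, by simp [dfsA, hm]⟩
    · have hcP : c ∉ P := (List.nodup_cons.mp hndc).1
      have hdrop := filter_len_drop allN hnd c (hroot c hc) P hcP
      have aux : ∀ (l : List String), (∀ d ∈ l, d ∈ chl ed c) → ∀ o0 u0,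
          ∃ ok uk, l.foldl (fun acc d => acc.bind (fun p => dfsA ed f p.2 d p.1)) (some (o0, u0))
            = some (ok, uk) := by
        intro l
        induction l with
        | nil => intro _ o0 u0; exact ⟨o0, u0, rfl⟩
        | cons d l ihl =>
          intro hdl o0 u0
          have hdc : d ∈ chl ed c := hdl d (List.mem_cons_self ..)
          have hrd : Rooted d := hclosed c d hc hdc
          have hdP : d ∉ c :: P := by
            intro hdin
            exact hnc d hrd (Relation.TransGen.tail' (ancRTG ed P c d hch hdin) hdc)
          obtain ⟨o1, u1, h1⟩ := ih (c :: P) d u0 o0 hrd ⟨hdc, hch⟩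
            (List.nodup_cons.mpr ⟨hdP, hndc⟩) (by omega)
          obtain ⟨ok, uk, h2⟩ := ihl (fun z hz => hdl z (List.mem_cons_of_mem d hz)) o1 u1
          exact ⟨ok, uk, by rw [foldl_bind_cons, h1]; exact h2⟩
      obtain ⟨ok, uk, hfold⟩ := aux (chl ed c) (fun d hd => hd) o u
      refine ⟨ok ++ [c], PySem.Set.add uk c, ?_⟩
      simp only [dfsA, h1]
      simp only [Bool.false_eq_true, if_false]
      rw [show ((PySem.Dict.get? ed c).getD []) = chl ed c from rfl, hfold]

theorem mem_expandR (deps : List (String × List String)) (S : List String) (x : String) :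
    x ∈ expandR deps S ↔ x ∈ S ∨ ∃ y ∈ S, EdgS deps y x := by
  unfold expandR EdgS
  rw [PySem.Set.mem_ofList]
  simp

theorem iter_grow (deps : List (String × List String)) (S : List String) :
    ∀ k x, x ∈ (expandR deps)^[k] S → x ∈ (expandR deps)^[k + 1] S := by
  intro k x h
  rw [Function.iterate_succ_apply']
  rw [mem_expandR]
  exact Or.inl h

theorem iter_le (deps : List (String × List String)) (S : List String) (j k : Nat) (h : j ≤ k) :
    ∀ x, x ∈ (expandR deps)^[j] S → x ∈ (expandR deps)^[k] S := by
  induction k with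
  | zero => intro x hx; have : j = 0 := Nat.le_zero.mp h; subst this; exact hx
  | succ k ih =>
    intro x hx
    rcases Nat.lt_or_ge j (k + 1) with hl | hg
    · exact iter_grow deps S k x (ih (Nat.lt_succ_iff.mp hl) x hx)
    · have : j = k + 1 := Nat.le_antisymm h hg
      subst this; exact hx

theorem iter_bound (deps : List (String × List String)) (S : List String) :
    ∀ k x, x ∈ (expandR deps)^[k] S → x ∈ S ∨ x ∈ deps.map (·.1) := by
  intro k
  induction k with
  | zero => intro x hx; exact Or.inl hx
  | succ k ih =>
    intro x hx
    rw [Function.iterate_succ_apply', mem_expandR] at hx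
    rcases hx with hx | ⟨y, _, he⟩
    · exact ih x hx
    · right
      unfold EdgS succsOf at he
      rcases List.mem_map.mp he with ⟨p, hp, rfl⟩
      exact List.mem_map.mpr ⟨p, (List.mem_filter.mp hp).1, rfl⟩

theorem stable_closed (deps : List (String × List String)) (S : List String) (k : Nat)
    (hst : ∀ x, x ∈ (expandR deps)^[k + 1] S ↔ x ∈ (expandR deps)^[k] S) :
    ∀ a ∈ (expandR deps)^[k] S, ∀ b, EdgS deps a b → b ∈ (expandR deps)^[k] S := by
  intro a ha b he
  apply (hst b).mp
  rw [Function.iterate_succ_apply', mem_expandR]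
  exact Or.inr ⟨a, ha, he⟩

theorem exists_stable (deps : List (String × List String)) (S : List String) :
    ∃ k ≤ S.length + deps.length + 2,
      ∀ x, x ∈ (expandR deps)^[k + 1] S ↔ x ∈ (expandR deps)^[k] S := by
  by_contra hcon
  push Not at hcon
  -- each unstable step strictly grows the toFinset of the iterate
  have strict : ∀ k, (∃ x, x ∈ (expandR deps)^[k + 1] S ∧ x ∉ (expandR deps)^[k] S) →
      ((expandR deps)^[k] S).toFinset ⊂ ((expandR deps)^[k + 1] S).toFinset := by
    intro k ⟨x, hx1, hx2⟩
    constructor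
    · intro y hy
      rw [List.mem_toFinset] at *
      exact iter_grow deps S k y (by simpa using hy)
    · intro hsub
      exact hx2 (List.mem_toFinset.mp (hsub (List.mem_toFinset.mpr hx1)))
  have unst : ∀ k ≤ S.length + deps.length + 2,
      ∃ x, x ∈ (expandR deps)^[k + 1] S ∧ x ∉ (expandR deps)^[k] S := by
    intro k hk
    obtain ⟨x, hx⟩ := hcon k hk
    rcases hx with ⟨h1, h2⟩ | ⟨h1, h2⟩
    · exact ⟨x, h1, h2⟩
    · exact absurd (iter_grow deps S k x h2) h1
  have cards : ∀ k ≤ S.length + deps.length + 3,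
      k ≤ ((expandR deps)^[k] S).toFinset.card := by
    intro k
    induction k with
    | zero => intro _; exact Nat.zero_le _
    | succ k ih =>
      intro hk
      have hs := strict k (unst k (by omega))
      have := Finset.card_lt_card hs
      have := ih (by omega)
      omega
  have hbig := cards (S.length + deps.length + 3) (le_refl _)
  -- but every iterate lives inside S ++ keys
  have hsub : ((expandR deps)^[S.length + deps.length + 3] S).toFinset
      ⊆ (S ++ deps.map (·.1)).toFinset := by
    intro x hx
    rw [List.mem_toFinset] at *
    rcases iter_bound deps S _ x hx with h | h
    · exact List.mem_append.mpr (Or.inl h)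
    · exact List.mem_append.mpr (Or.inr h)
  have := Finset.card_le_card hsub
  have hle := List.toFinset_card_le (S ++ deps.map (·.1))
  simp only [List.length_append, List.length_map] at hle
  omega

theorem closureR_complete (deps : List (String × List String)) (S : List String)
    (y x : String) (hy : y ∈ S) (hr : Relation.ReflTransGen (EdgS deps) y x) :
    x ∈ closureR deps S := by
  obtain ⟨k, hk, hst⟩ := exists_stable deps S
  have hclosed := stable_closed deps S k hst
  have hyk : y ∈ (expandR deps)^[k] S := iter_le deps S 0 k (Nat.zero_le k) y hy
  have hxk : x ∈ (expandR deps)^[k] S := by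
    induction hr with
    | refl => exact hyk
    | tail hab hbc ih => exact hclosed _ ih _ hbc
  exact iter_le deps S k (S.length + deps.length + 3) (by omega) x hxk

theorem revDeps_eq (deps : List (String × List String)) : revDepsA deps = revDepsB deps := rfl

theorem getD_revDepsB (deps : List (String × List String)) (a : String) :
    chl (revDepsB deps) a
      = ((deps.flatMap (fun kv => kv.2.map (fun e => (e, kv.1)))).filter
          (fun p => p.1 == a)).map (·.2) := by
  have main : ∀ (l : List (String × List String)) (d : PySem.Dict String (List String)),
      l.foldl (fun rd kv => kv.2.foldl
          (fun rd2 e => PySem.Dict.modify rd2 e [] (fun v => v ++ [kv.1])) rd) d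
        = (l.flatMap (fun kv => kv.2.map (fun e => (e, kv.1)))).foldl
            (fun rd p => PySem.Dict.modify rd p.1 [] (fun v => v ++ [p.2])) d := by
    intro l
    induction l with
    | nil => intro d; rfl
    | cons kv rest ih =>
      intro d
      simp only [List.foldl_cons, List.flatMap_cons, List.foldl_append]
      rw [ih, List.foldl_map]
  unfold revDepsB chl
  by_cases hemp : deps.isEmpty
  · have : deps = [] := List.isEmpty_iff.mp hemp
    subst this
    simp [PySem.Dict.get?_empty]
  · rw [if_neg hemp, main]
    rw [show ∀ (d : PySem.Dict String (List String)), (PySem.Dict.get? d a).getD [] = PySem.Dict.getD d a [] from fun d => (PySem.Dict.getD_eq_get?_getD d a []).symm]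
    rw [PySem.Dict.getD_foldl_modify_append]
    simp [PySem.Dict.getD_empty]

theorem mem_chl_iff_EdgS (deps : List (String × List String)) (a b : String) :
    b ∈ chl (revDepsB deps) a ↔ EdgS deps a b := by
  rw [getD_revDepsB]
  unfold EdgS succsOf
  simp only [List.mem_map, List.mem_filter, List.mem_flatMap]
  constructor
  · rintro ⟨p, ⟨⟨kv, hkv, hp⟩, he⟩, rfl⟩
    obtain ⟨e, hev, rfl⟩ := hp
    refine ⟨kv, ⟨hkv, ?_⟩, rfl⟩
    simp only [beq_iff_eq] at he
    subst he
    simpa [List.contains_eq_mem] using hev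
  · rintro ⟨kv, ⟨hkv, ha⟩, rfl⟩
    refine ⟨(a, kv.1), ⟨⟨kv, hkv, ?_⟩, by simp⟩, rfl⟩
    simp only [List.contains_eq_mem, decide_eq_true_eq] at ha
    exact ⟨a, ha, rfl⟩


theorem outer_some (ed : PySem.Dict String (List String)) (allN : List String)
    (hnd : allN.Nodup) (Rooted : String → Prop)
    (hclosed : ∀ a b, Rooted a → b ∈ chl ed a → Rooted b)
    (hroot : ∀ x, Rooted x → x ∈ allN)
    (hnc : ∀ x, Rooted x → ¬ Relation.TransGen (EdgD ed) x x)
    (fA : Nat) (hfA : allN.length ≤ fA) :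
    ∀ ds : List String, (∀ s ∈ ds, Rooted s) → ∀ o u,
      ∃ p, ds.foldl (fun acc e => acc.bind (fun q => dfsA ed fA q.2 e q.1)) (some (o, u)) = some p := by
  intro ds
  induction ds with
  | nil => intro _ o u; exact ⟨(o, u), rfl⟩
  | cons s ds ih =>
    intro hds o u
    obtain ⟨o1, u1, h1⟩ := dfsA_suff ed allN hnd Rooted hclosed hroot hnc fA [] s u o
      (hds s (List.mem_cons_self ..)) trivial
      (List.nodup_cons.mpr ⟨by simp, List.nodup_nil⟩) (by simpa using hfA)
    obtain ⟨p, h2⟩ := ih (fun z hz => hds z (List.mem_cons_of_mem s hz)) o1 u1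
    exact ⟨p, by rw [foldl_bind_cons, h1]; exact h2⟩

theorem outer_eq (ed : PySem.Dict String (List String)) (allN : List String)
    (hnd : allN.Nodup) (Rooted : String → Prop)
    (hclosed : ∀ a b, Rooted a → b ∈ chl ed a → Rooted b)
    (hroot : ∀ x, Rooted x → x ∈ allN)
    (hnc : ∀ x, Rooted x → ¬ Relation.TransGen (EdgD ed) x x)
    (fA fB : Nat) (hfB : 2 + W ed allN PySem.Set.empty ≤ fB) :
    ∀ ds : List String, (∀ s ∈ ds, Rooted s) → ∀ o u p,
      ds.foldl (fun acc e => acc.bind (fun q => dfsA ed fA q.2 e q.1)) (some (o, u)) = some p →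
      ds.foldl (fun acc st => acc.bind (fun q => runB ed fB [(st, false)] q.1 q.2)) (some (o, u)) = some p := by
  intro ds
  induction ds with
  | nil => intro _ o u p h; exact h
  | cons s ds ih =>
    intro hds o u p h
    rw [foldl_bind_cons] at h
    rw [foldl_bind_cons]
    cases h1 : dfsA ed fA u s o with
    | none => rw [h1, foldl_bind_none] at h; exact absurd h (by simp)
    | some q =>
      rw [h1] at h
      obtain ⟨o1, u1⟩ := q
      have hb1 : runB ed 1 [] o1 u1 = some (o1, u1) := rfl
      have hbr := bridge ed allN hnd Rooted hclosed hroot hnc fA u s o o1 u1 h1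
        (hds s (List.mem_cons_self ..)) [] 1 (o1, u1) hb1
      have hwu : W ed allN u ≤ W ed allN PySem.Set.empty := W_le_empty ed allN u
      have hrun : runB ed fB [(s, false)] o u = some (o1, u1) :=
        runB_le ed _ fB (by omega) _ _ _ _ hbr
      rw [hrun]
      exact ih (fun z hz => hds z (List.mem_cons_of_mem s hz)) o1 u1 p h

-- ===== VERDICT (by name: the statement is the Claim_ definition above) =====
theorem get_extensions_order_to_drop_spec : Claim_equal_get_extensions_order_to_drop := by
  intro deps doomed hdom hpre
  unfold Spec_get_extensions_order_to_drop
  have hnd : (nodesB deps doomed).Nodup := PySem.Set.nodup_ofList _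
  have hclosed : ∀ a b, (∃ d ∈ doomed, Relation.ReflTransGen (EdgD (revDepsB deps)) d a) →
      b ∈ chl (revDepsB deps) a → (∃ d ∈ doomed, Relation.ReflTransGen (EdgD (revDepsB deps)) d b) := by
    rintro a b ⟨d, hd, hr⟩ hb
    exact ⟨d, hd, hr.tail hb⟩
  have hroot : ∀ x, (∃ d ∈ doomed, Relation.ReflTransGen (EdgD (revDepsB deps)) d x) →
      x ∈ nodesB deps doomed := by
    rintro x ⟨d, hd, hr⟩
    unfold nodesB
    rw [PySem.Set.mem_ofList]
    rcases Relation.ReflTransGen.cases_tail hr with heq | ⟨c, _, hcx⟩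
    · subst heq
      simp [hd]
    · have : EdgS deps c x := (mem_chl_iff_EdgS deps c x).mp hcx
      unfold EdgS succsOf at this
      rcases List.mem_map.mp this with ⟨pp, hpp, rfl⟩
      have : pp.1 ∈ deps.map (·.1) := List.mem_map.mpr ⟨pp, (List.mem_filter.mp hpp).1, rfl⟩
      simp [this]
  have hnc : ∀ x, (∃ d ∈ doomed, Relation.ReflTransGen (EdgD (revDepsB deps)) d x) →
      ¬ Relation.TransGen (EdgD (revDepsB deps)) x x := by
    rintro x ⟨d, hd, hr⟩ htg
    have hmono : ∀ a b, EdgD (revDepsB deps) a b → EdgS deps a b :=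
      fun a b hab => (mem_chl_iff_EdgS deps a b).mp hab
    have hx1 : x ∈ closureR deps doomed :=
      closureR_complete deps doomed d x hd (Relation.ReflTransGen.mono hmono hr)
    have htgS : Relation.TransGen (EdgS deps) x x := Relation.TransGen.mono hmono htg
    obtain ⟨y, hxy, hyx⟩ := Relation.TransGen.head'_iff.mp htgS
    exact hpre x hx1 (closureR_complete deps (succsOf deps x) y x hxy hyx)
  have hfAeq : dfsFuelA deps doomed = (nodesB deps doomed).length + 1 := rfl
  obtain ⟨p, hA⟩ := outer_some (revDepsB deps) (nodesB deps doomed) hnd _ hclosed hroot hnc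
    (dfsFuelA deps doomed) (by omega) doomed
    (fun s hs => ⟨s, hs, Relation.ReflTransGen.refl⟩) [] PySem.Set.empty
  have hB := outer_eq (revDepsB deps) (nodesB deps doomed) hnd _ hclosed hroot hnc
    (dfsFuelA deps doomed) (fuelB (revDepsB deps) (nodesB deps doomed))
    (by rw [fuelB_eq]) doomed
    (fun s hs => ⟨s, hs, Relation.ReflTransGen.refl⟩) [] PySem.Set.empty p hA
  unfold get_extensions_order_to_drop get_extensions_order_to_drop_alt
  rw [revDeps_eq]
  rw [hA, hB]
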